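-- pv_equiv track=rewrite | github.com/pedromouzinho/dbde_ai_assistant-main | tools.py | _match_column_name
-- ===== SOURCE A (Python) =====
-- import json, base64, asyncio, logging, uuid, re, math, unicodedata, io, csv, statistics
--
-- def _normalize_lookup_key(value: str) -> str:
--     txt = unicodedata.normalize("NFKD", str(value or ""))
--     txt = "".join(ch for ch in txt if not unicodedata.combining(ch))
--     return txt.lower().strip()
--
-- def _match_column_name(requested: str, columns):
--     if not requested:
--         return ""
--     wanted = _normalize_lookup_key(requested)
--     if not wanted:
--         return ""
--     direct = { _normalize_lookup_key(c): c for c in (columns or []) }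
--     if wanted in direct:
--         return direct[wanted]
--     for c in columns or []:
--         n = _normalize_lookup_key(c)
--         if wanted in n or n in wanted:
--             return c
--     return ""
-- ===== SOURCE B (Python) =====
-- import unicodedata
--
-- def _normalize_lookup_key(value: str) -> str:
--     txt = unicodedata.normalize("NFKD", str(value or ""))
--     txt = "".join(ch for ch in txt if not unicodedata.combining(ch))
--     return txt.lower().strip()
--
-- def _match_column_name(requested: str, columns):
--     if not requested:
--         return ""
--     wanted = _normalize_lookup_key(requested)
--     if not wanted:
--         return ""
--     # single fused pass: normalize each column once, track the last exact match
--     # (= dict overwrite semantics) and the first fuzzy match simultaneously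
--     exact = None
--     fuzzy = None
--     for c in (columns or []):
--         n = _normalize_lookup_key(c)
--         if n == wanted:
--             exact = c
--         elif fuzzy is None and (wanted in n or n in wanted):
--             fuzzy = c
--     if exact is not None:
--         return exact
--     return fuzzy if fuzzy is not None else ""
-- ===== Notes on version B (the rewrite author's own statement) =====
-- stated objective: simpler
-- what changed: Replaces A's dict index plus separate fallback loop with one fused linear pass that normalizes each column once and maintains two accumulators (the last exact-normalized match, matching dict overwrite semantics, and the first fuzzy match), choosing between them at the end.
import Mathlib
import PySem

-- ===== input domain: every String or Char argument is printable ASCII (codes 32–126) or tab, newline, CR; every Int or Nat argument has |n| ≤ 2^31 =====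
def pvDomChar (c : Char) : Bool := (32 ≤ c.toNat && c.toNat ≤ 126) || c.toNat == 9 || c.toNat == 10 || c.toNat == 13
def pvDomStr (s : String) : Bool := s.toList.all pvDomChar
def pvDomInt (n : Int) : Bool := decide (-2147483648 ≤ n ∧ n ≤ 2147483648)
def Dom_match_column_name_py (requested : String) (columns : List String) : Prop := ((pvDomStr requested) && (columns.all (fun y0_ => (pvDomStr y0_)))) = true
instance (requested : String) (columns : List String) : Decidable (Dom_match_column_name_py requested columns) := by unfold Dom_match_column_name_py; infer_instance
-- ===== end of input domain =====

-- B fuses A's dict index and fallback loop into ONE pass with two accumulators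
-- (last exact match, first fuzzy match); objective: simpler.

-- ===== PORT A =====
-- _normalize_lookup_key: NFKD normalization and combining-character removal are the identity on the
-- printable-ASCII domain these theorems are about, so the port is lower-then-strip (exact on Dom).
def pvNormA (s : String) : String := PySem.Str.strip (PySem.Str.lower s)

-- 'for c in columns or []: n = …; if wanted in n or n in wanted: return c' / 'return ""'
def pvLoopA (wanted : String) : List String → String
  | [] => ""
  | c :: rest =>
    let n := pvNormA c
    if PySem.Str.isIn wanted n || PySem.Str.isIn n wanted then c else pvLoopA wanted rest

def match_column_name_py (requested : String) (columns : List String) : String :=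
  if requested = "" then ""
  else
    let wanted := pvNormA requested
    if wanted = "" then ""
    else
      let direct : PySem.Dict String String :=
        columns.foldl (fun d c => d.insert (pvNormA c) c) PySem.Dict.empty
      if direct.contains wanted then direct.getD wanted ""
      else pvLoopA wanted columns

-- ===== PORT B =====
-- Same _normalize_lookup_key helper, ported identically (exact on the ASCII domain).
def pvNormB (s : String) : String := PySem.Str.strip (PySem.Str.lower s)

-- the body of B's single for-loop: state = (exact, fuzzy)
def pvStepB (wanted : String) (st : Option String × Option String) (c : String) :
    Option String × Option String :=
  let n := pvNormB c
  if n = wanted then (some c, st.2)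
  else if st.2 = none ∧ (PySem.Str.isIn wanted n || PySem.Str.isIn n wanted) then (st.1, some c)
  else st

def match_column_name_py_alt (requested : String) (columns : List String) : String :=
  if requested = "" then ""
  else
    let wanted := pvNormB requested
    if wanted = "" then ""
    else
      let st := columns.foldl (pvStepB wanted) (none, none)
      match st.1 with
      | some c => c
      | none => st.2.getD ""

-- ===== PRECONDITION & SPEC =====
def Spec_match_column_name_py (requested : String) (columns : List String) (out : String) : Prop := out = match_column_name_py_alt requested columns
instance (requested : String) (columns : List String) (out : String) : Decidable (Spec_match_column_name_py requested columns out) := by unfold Spec_match_column_name_py; infer_instance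

-- ===== CLAIM (what is proved, stated in full; the proofs are below) =====
def Claim_equal_match_column_name_py : Prop := ∀ (requested : String) (columns : List String), Dom_match_column_name_py requested columns → Spec_match_column_name_py requested columns (match_column_name_py requested columns)

-- ===== LEMMAS AND PROOFS =====

-- last column (scanning from the right) whose normalized key equals wanted
def pvLastExact (wanted : String) : List String → Option String
  | [] => none
  | c :: rest => if pvNormB c = wanted then some c else pvLastExact wanted rest

-- first column whose normalized key n satisfies n ≠ wanted and the fuzzy condition
def pvFirstFuzzy (wanted : String) : List String → Option String
  | [] => none
  | c :: rest =>
    let n := pvNormB c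
    if n = wanted then pvFirstFuzzy wanted rest
    else if PySem.Str.isIn wanted n || PySem.Str.isIn n wanted then some c
    else pvFirstFuzzy wanted rest

-- dict built by fold-insert: membership = some column normalizes to the key
theorem pv_contains_fold (wanted : String) (cols : List String) (d : PySem.Dict String String) :
    (cols.foldl (fun d c => d.insert (pvNormA c) c) d).contains wanted
      = (d.contains wanted || cols.any (fun c => pvNormA c == wanted)) := by
  induction cols generalizing d with
  | nil => simp
  | cons c rest ih =>
    simp only [List.foldl_cons, List.any_cons, ih, PySem.Dict.contains_insert]
    by_cases h : wanted = pvNormA c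
    · simp [h]
    · have h2 : (wanted == pvNormA c) = false := by simp [h]
      have h3 : (pvNormA c == wanted) = false := by simp [Ne.symm h]
      simp [h2, h3]

theorem pv_lastExact_append (wanted c : String) (xs : List String) :
    pvLastExact wanted (xs ++ [c])
      = match pvLastExact wanted xs with
        | some x => some x
        | none => if pvNormB c = wanted then some c else none := by
  induction xs with
  | nil => simp [pvLastExact]
  | cons y t iht =>
    by_cases hy : pvNormB y = wanted <;> simp [pvLastExact, hy, iht]

-- dict built by fold-insert: lookup = last column normalizing to the key (overwrite semantics)
theorem pv_getD_fold (wanted : String) (cols : List String) (d : PySem.Dict String String) :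
    (cols.foldl (fun d c => d.insert (pvNormA c) c) d).getD wanted ""
      = match pvLastExact wanted cols.reverse with
        | some c => c
        | none => d.getD wanted "" := by
  induction cols generalizing d with
  | nil => simp [pvLastExact]
  | cons c rest ih =>
    simp only [List.foldl_cons, List.reverse_cons, ih, pv_lastExact_append]
    cases hx : pvLastExact wanted rest.reverse with
    | some x => simp
    | none =>
      by_cases hc : pvNormB c = wanted
      · have hc' : pvNormA c = wanted := hc
        simp [hc, hc']
      · simp [hc, PySem.Dict.getD_insert]
        intro he
        exact absurd he.symm hc

-- no exact match in cols ↔ pvLastExact is none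
theorem pv_lastExact_none_iff (wanted : String) (cols : List String) :
    pvLastExact wanted cols = none ↔ ∀ c ∈ cols, pvNormB c ≠ wanted := by
  induction cols with
  | nil => simp [pvLastExact]
  | cons c rest ih =>
    by_cases hc : pvNormB c = wanted <;> simp [pvLastExact, hc, ih]

theorem pv_lastExact_some (wanted : String) (cols : List String) (x : String)
    (h : pvLastExact wanted cols = some x) : x ∈ cols ∧ pvNormB x = wanted := by
  induction cols with
  | nil => simp [pvLastExact] at h
  | cons c rest ih =>
    by_cases hc : pvNormB c = wanted
    · simp [pvLastExact, hc] at h; subst h; exact ⟨List.mem_cons_self, hc⟩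
    · simp [pvLastExact, hc] at h
      rcases ih h with ⟨hm, he⟩
      exact ⟨List.mem_cons_of_mem _ hm, he⟩

-- the fold's first accumulator is the last exact match (or the initial value)
theorem pv_fold_fst (wanted : String) (cols : List String) (e f : Option String) :
    (cols.foldl (pvStepB wanted) (e, f)).1
      = match pvLastExact wanted cols.reverse with
        | some x => some x
        | none => e := by
  induction cols generalizing e f with
  | nil => simp [pvLastExact]
  | cons c rest ih =>
    simp only [List.foldl_cons, List.reverse_cons, pv_lastExact_append]
    have hstep : (pvStepB wanted (e, f) c)
        = (if pvNormB c = wanted then ((some c : Option String), f)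
           else if f = none ∧ (PySem.Str.isIn wanted (pvNormB c) || PySem.Str.isIn (pvNormB c) wanted)
           then (e, some c) else (e, f)) := rfl
    cases hx : pvLastExact wanted rest.reverse with
    | some x => rw [hstep]; split_ifs <;> simp [ih, hx]
    | none => rw [hstep]; split_ifs <;> simp [ih, hx]

-- the fold's second accumulator is the first fuzzy non-exact match (or the initial value)
theorem pv_fold_snd (wanted : String) (cols : List String) (e f : Option String) :
    (cols.foldl (pvStepB wanted) (e, f)).2
      = match f with
        | some x => some x
        | none => pvFirstFuzzy wanted cols := by
  induction cols generalizing e f with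
  | nil => cases f <;> simp [pvFirstFuzzy]
  | cons c rest ih =>
    simp only [List.foldl_cons]
    by_cases hc : pvNormB c = wanted
    · have : pvStepB wanted (e, f) c = (some c, f) := by simp [pvStepB, hc]
      rw [this, ih]
      cases f <;> simp [pvFirstFuzzy, hc]
    · by_cases hf : f = none
      · subst hf
        by_cases hcond : (PySem.Str.isIn wanted (pvNormB c) || PySem.Str.isIn (pvNormB c) wanted) = true
        · have hstep : pvStepB wanted (e, none) c = (e, some c) := by
            simp only [pvStepB]
            rw [if_neg hc, if_pos ⟨trivial, hcond⟩]
          rw [hstep, ih]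
          show some c = pvFirstFuzzy wanted (c :: rest)
          simp only [pvFirstFuzzy]
          rw [if_neg hc, if_pos hcond]
        · have hstep : pvStepB wanted (e, none) c = (e, none) := by
            simp only [pvStepB]
            rw [if_neg hc, if_neg (fun hx => hcond hx.2)]
          rw [hstep, ih]
          show pvFirstFuzzy wanted rest = pvFirstFuzzy wanted (c :: rest)
          simp only [pvFirstFuzzy]
          rw [if_neg hc, if_neg hcond]
      · rcases Option.ne_none_iff_exists'.mp hf with ⟨x, hx⟩
        subst hx
        have : pvStepB wanted (e, some x) c = (e, some x) := by simp [pvStepB, hc]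
        rw [this, ih]

-- when no column normalizes exactly to wanted, A's fallback loop = B's first-fuzzy accumulator
theorem pv_loopA_eq_firstFuzzy (wanted : String) (cols : List String)
    (h : ∀ c ∈ cols, pvNormB c ≠ wanted) :
    pvLoopA wanted cols = (pvFirstFuzzy wanted cols).getD "" := by
  induction cols with
  | nil => rfl
  | cons c rest ih =>
    have hc : pvNormB c ≠ wanted := h c List.mem_cons_self
    have hrest : ∀ x ∈ rest, pvNormB x ≠ wanted := fun x hx => h x (List.mem_cons_of_mem _ hx)
    have hAB : pvNormA c = pvNormB c := rfl
    simp only [pvLoopA, pvFirstFuzzy, hAB]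
    rw [if_neg hc]
    by_cases hcond : (PySem.Str.isIn wanted (pvNormB c) || PySem.Str.isIn (pvNormB c) wanted) = true
    · rw [if_pos hcond, if_pos hcond]; rfl
    · rw [if_neg hcond, if_neg hcond]; exact ih hrest

-- ===== VERDICT (by name: the statement is the Claim_ definition above) =====
theorem match_column_name_py_spec : Claim_equal_match_column_name_py := by
  intro requested columns _
  unfold Spec_match_column_name_py match_column_name_py match_column_name_py_alt
  by_cases hreq : requested = ""
  · simp [hreq]
  · simp only [hreq, if_false]
    by_cases hw : pvNormA requested = ""
    · have hw' : pvNormB requested = "" := hw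
      simp [hw, hw']
    · have hw' : pvNormB requested ≠ "" := hw
      simp only [hw, hw', if_false]
      rw [pv_getD_fold, pv_contains_fold, pv_fold_fst, pv_fold_snd]
      have hnorm : pvNormB requested = pvNormA requested := rfl
      rw [hnorm]
      cases hx : pvLastExact (pvNormA requested) columns.reverse with
      | some x =>
        have hs := pv_lastExact_some _ _ _ hx
        have hany : columns.any (fun c => pvNormA c == pvNormA requested) = true := by
          simp only [List.any_eq_true, beq_iff_eq]
          exact ⟨x, List.mem_reverse.mp hs.1, hs.2⟩
        simp [hany]
      | none =>
        have hnon : ∀ c ∈ columns, pvNormB c ≠ pvNormA requested := by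
          rw [pv_lastExact_none_iff] at hx
          intro c hc
          exact hx c (List.mem_reverse.mpr hc)
        have hany : columns.any (fun c => pvNormA c == pvNormA requested) = false := by
          simp only [List.any_eq_false, beq_iff_eq]
          exact hnon
        simp [hany, pv_loopA_eq_firstFuzzy _ _ hnon]
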